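-- pv_equiv track=rewrite | github.com/Thunga269/Python | ktra_so_dep.py | check
-- ===== SOURCE A (Python) =====
-- def check(n):
--     s1 = n[0]
--     s2 = n[1]
--     for i in range(len(n)):
--         if(i%2==0 and n[i]!=s1):
--             return False
--         else:
--             if(i%2!=0 and n[i]!=s2):
--                 return False
--     return True
-- ===== SOURCE B (Python) =====
-- def check(n):
--     s1 = n[0]
--     s2 = n[1]
--     return n == ((s1 + s2) * ((len(n) + 1) // 2))[:len(n)]
-- ===== Notes on version B (the rewrite author's own statement) =====
-- stated objective: faster
-- what changed: Instead of a modulo-branched Python-level loop over indices, B builds the expected alternating pattern ((s1+s2) repeated, truncated to len(n)) once and compares it to n with a single string equality.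
import Mathlib
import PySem

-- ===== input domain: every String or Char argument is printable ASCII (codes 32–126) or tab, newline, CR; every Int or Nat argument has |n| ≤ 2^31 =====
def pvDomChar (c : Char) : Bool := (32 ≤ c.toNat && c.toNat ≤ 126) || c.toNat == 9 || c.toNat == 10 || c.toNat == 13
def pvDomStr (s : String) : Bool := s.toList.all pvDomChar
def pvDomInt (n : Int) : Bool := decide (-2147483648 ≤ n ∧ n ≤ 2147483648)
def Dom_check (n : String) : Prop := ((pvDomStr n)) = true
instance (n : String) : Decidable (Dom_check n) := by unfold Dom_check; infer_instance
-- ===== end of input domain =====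

-- B replaces A's modulo-branched index loop by building the expected alternating
-- pattern once and comparing it to n with a single equality (objective: alternative).

-- ===== PORT A =====
-- for i in range(len(n)): the loop carries the current character list and the index i
def checkLoop (s1 s2 : Char) (l : List Char) (i : Nat) : Bool :=
  match l with
  | [] => true
  | c :: rest =>
    if i % 2 == 0 && c != s1 then false
    else if i % 2 != 0 && c != s2 then false
    else checkLoop s1 s2 rest (i + 1)

def check (n : String) : Bool :=
  match PySem.Str.pyGet? n 0 with
  | none => false            -- IndexError: outside Pre_check
  | some s1 =>
    match PySem.Str.pyGet? n 1 with
    | none => false          -- IndexError: outside Pre_check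
    | some s2 => checkLoop s1 s2 n.toList 0

-- ===== PORT B =====
def check_alt (n : String) : Bool :=
  match PySem.Str.pyGet? n 0 with
  | none => false            -- IndexError: outside Pre_check
  | some s1 =>
    match PySem.Str.pyGet? n 1 with
    | none => false          -- IndexError: outside Pre_check
    | some s2 =>
      -- (s1 + s2) * ((len(n) + 1) // 2), then [:len(n)], compared with n
      -- (len+1)//2: both operands are nonnegative Nats, so Nat division matches Python's //
      let pat : List Char := (List.replicate ((n.toList.length + 1) / 2) [s1, s2]).flatten
      decide (n.toList = PySem.List.slice pat none (some (n.toList.length : Int)))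

-- ===== PRECONDITION & SPEC =====
-- Pre_check excludes strings of length < 2, on which A raises IndexError (n[0] or n[1]).
def Pre_check (n : String) : Prop := 2 ≤ n.toList.length
instance (n : String) : Decidable (Pre_check n) := by unfold Pre_check; infer_instance
def pvWitness_check : String := "ab"

def Spec_check (n : String) (out : Bool) : Prop := out = check_alt n
instance (n : String) (out : Bool) : Decidable (Spec_check n out) := by unfold Spec_check; infer_instance

-- ===== CLAIM (what is proved, stated in full; the proofs are below) =====
def Claim_equal_check : Prop := ∀ (n : String), Dom_check n → Pre_check n → Spec_check n (check n)

-- ===== LEMMAS AND PROOFS =====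

theorem checkLoop_parity (s1 s2 : Char) (l : List Char) (i : Nat) :
    checkLoop s1 s2 l (i + 2) = checkLoop s1 s2 l i := by
  induction l generalizing i with
  | nil => simp [checkLoop]
  | cons c rest ih =>
    have h2 : (i + 2) % 2 = i % 2 := Nat.add_mod_right i 2
    simp only [checkLoop, h2]
    split_ifs <;> simp_all [show i + 2 + 1 = i + 1 + 2 by ring]

theorem checkLoop_eq_pattern (s1 s2 : Char) :
    ∀ l : List Char,
      checkLoop s1 s2 l 0 =
        decide (l = ((List.replicate ((l.length + 1) / 2) [s1, s2]).flatten).take l.length)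
  | [] => by simp [checkLoop]
  | [a] => by
    by_cases h : a = s1 <;> simp [checkLoop, h]
  | a :: b :: rest => by
    have ih := checkLoop_eq_pattern s1 s2 rest
    have hk : (rest.length + 2 + 1) / 2 = (rest.length + 1) / 2 + 1 := by omega
    simp only [List.length_cons, hk, List.replicate_succ, List.flatten_cons]
    by_cases h1 : a = s1 <;> by_cases h2 : b = s2 <;>
      simp [checkLoop, h1, h2, checkLoop_parity s1 s2 rest 0, ih]

-- ===== VERDICT (by name: the statement is the Claim_ definition above) =====
theorem check_spec : Claim_equal_check := by
  intro n _ hpre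
  unfold Spec_check check check_alt
  obtain ⟨a, b, t, hl⟩ : ∃ a b t, n.toList = a :: b :: t := by
    unfold Pre_check at hpre
    match h : n.toList with
    | [] => simp [h] at hpre
    | [a] => simp [h] at hpre
    | a :: b :: t => exact ⟨a, b, t, rfl⟩
  have h0 : PySem.Str.pyGet? n 0 = some a := by
    simp [PySem.Str.pyGet?, PySem.Chars.pyGet?, PySem.List.pyGet?, PySem.List.pyIdx?, hl,
          show (0:Int) ≤ (t.length:Int) + 1 by positivity]
  have h1 : PySem.Str.pyGet? n 1 = some b := by
    simp [PySem.Str.pyGet?, PySem.Chars.pyGet?, PySem.List.pyGet?, PySem.List.pyIdx?, hl]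
  rw [h0, h1, hl]
  simp only [PySem.List.slice_to_natCast]
  exact checkLoop_eq_pattern a b (a :: b :: t)
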